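-- pv_equiv track=rewrite | github.com/AndrewUpdegrove/advent-of-code-2021 | day10/syntax_scoring.py | calc_autocomplete
-- ===== SOURCE A (Python) =====
-- def calc_autocomplete(lines):
--     auto_points = {
--         ')' : 1,
--         ']' : 2,
--         '}' : 3,
--         '>' : 4
--     }
--
--     scores = []
--     for end in lines:
--         money = 0
--         for char in list(end):
--             money *= 5
--             money += auto_points[char]
--         scores.append(money)
--     return scores
-- ===== SOURCE B (Python) =====
-- def calc_autocomplete(lines):
--     def score(digits):
--         if not digits:
--             return 0
--         return digits[0] * 5 ** (len(digits) - 1) + score(digits[1:])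
--     return [score([")]}>".index(c) + 1 for c in line]) for line in lines]
-- ===== Notes on version B (the rewrite author's own statement) =====
-- stated objective: alternative
-- what changed: B first maps each line to a list of digits via the index of the char in the string ")]}>", then converts that digit list to a number by structural recursion with explicit positional weights d*5^(len-1), replacing A's single forward Horner fold over a points dict; lines are processed with a list comprehension (map) instead of an accumulator loop.
import Mathlib
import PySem

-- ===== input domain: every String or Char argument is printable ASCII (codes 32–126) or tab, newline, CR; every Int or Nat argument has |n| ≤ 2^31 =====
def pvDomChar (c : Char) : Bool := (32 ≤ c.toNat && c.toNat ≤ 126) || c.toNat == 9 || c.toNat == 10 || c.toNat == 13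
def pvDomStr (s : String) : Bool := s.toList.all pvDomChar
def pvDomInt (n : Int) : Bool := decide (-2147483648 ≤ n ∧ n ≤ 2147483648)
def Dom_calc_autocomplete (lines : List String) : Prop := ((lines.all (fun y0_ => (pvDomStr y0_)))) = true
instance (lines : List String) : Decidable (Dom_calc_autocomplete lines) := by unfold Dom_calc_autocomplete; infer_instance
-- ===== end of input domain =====

-- B maps each line to index-based digits (")]}>".index(c)+1) and converts the digit list by structural recursion with explicit positional weights d*5^(len-1), instead of A's forward Horner fold over a points dict; same cost, different decomposition.


-- ===== PORT A =====
-- auto_points dict; Python's lookup raises KeyError on other chars (excluded by Pre_, so the getD default is unreachable there)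
def autoPoints : PySem.Dict Char Int := PySem.Dict.ofList [(')',1), (']',2), ('}',3), ('>',4)]

def calc_autocomplete (lines : List String) : List Int :=
  lines.foldl (fun scores e =>
    scores ++ [e.toList.foldl (fun money c => money * 5 + PySem.Dict.getD autoPoints c 0) 0]) []

-- ===== PORT B =====
-- ")]}>".index(c) + 1; on other chars Python raises ValueError (excluded by Pre_, the getD default unreachable there)
def digitB (c : Char) : Int :=
  ((PySem.List.index? [')', ']', '}', '>'] c).getD 0 : Nat) + 1

-- digits-to-number by structural recursion: head digit carries weight 5^(length of the rest)
def scoreB : List Int → Int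
  | [] => 0
  | d :: rest => d * 5 ^ rest.length + scoreB rest

def calc_autocomplete_alt (lines : List String) : List Int :=
  lines.map (fun line => scoreB (line.toList.map digitB))

-- ===== PRECONDITION & SPEC =====
-- Pre_ excludes exactly the inputs where Python A raises KeyError: a character outside ')]}>'
def Pre_calc_autocomplete (lines : List String) : Prop :=
  (lines.all (fun s => s.toList.all (fun c => c ∈ [')', ']', '}', '>']))) = true
instance (lines : List String) : Decidable (Pre_calc_autocomplete lines) := by unfold Pre_calc_autocomplete; infer_instance
def pvWitness_calc_autocomplete : List String := ["])>", "", "}}"]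

def Spec_calc_autocomplete (lines : List String) (out : List Int) : Prop := out = calc_autocomplete_alt lines
instance (lines : List String) (out : List Int) : Decidable (Spec_calc_autocomplete lines out) := by unfold Spec_calc_autocomplete; infer_instance

-- ===== CLAIM (what is proved, stated in full; the proofs are below) =====
def Claim_equal_calc_autocomplete : Prop := ∀ (lines : List String), Dom_calc_autocomplete lines → Pre_calc_autocomplete lines → Spec_calc_autocomplete lines (calc_autocomplete lines)

-- ===== LEMMAS AND PROOFS =====

-- the two per-char point functions agree on the four legal chars
theorem digit_eq (c : Char) (hc : c ∈ [')', ']', '}', '>']) :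
    PySem.Dict.getD autoPoints c 0 = digitB c := by
  fin_cases hc <;> decide

-- A's Horner fold equals scoreB of the digit list, for ANY digit function f
theorem horner_eq_scoreB (f : Char → Int) (l : List Char) (acc : Int) :
    l.foldl (fun money c => money * 5 + f c) acc = acc * 5 ^ l.length + scoreB (l.map f) := by
  induction l generalizing acc with
  | nil => simp [scoreB]
  | cons c l ih =>
    simp only [List.foldl_cons, List.map_cons, List.length_cons, scoreB, List.length_map]
    rw [ih, pow_succ]
    ring

theorem line_eq (s : String) (hs : ∀ c ∈ s.toList, c ∈ [')', ']', '}', '>']) :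
    s.toList.foldl (fun money c => money * 5 + PySem.Dict.getD autoPoints c 0) 0
      = scoreB (s.toList.map digitB) := by
  rw [horner_eq_scoreB]
  have : s.toList.map (fun c => PySem.Dict.getD autoPoints c 0) = s.toList.map digitB :=
    List.map_congr_left (fun c hc => digit_eq c (hs c hc))
  simp [this]

-- the outer accumulator fold is map, generalized over the accumulator
theorem foldl_append_eq_map (g : String → Int) (lines : List String) (acc : List Int) :
    lines.foldl (fun scores e => scores ++ [g e]) acc = acc ++ lines.map g := by
  induction lines generalizing acc with
  | nil => simp [scoreB]
  | cons e lines ih => simp [ih]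

-- ===== VERDICT (by name: the statement is the Claim_ definition above) =====
theorem calc_autocomplete_spec : Claim_equal_calc_autocomplete := by
  intro lines _ hpre
  unfold Spec_calc_autocomplete calc_autocomplete calc_autocomplete_alt
  rw [foldl_append_eq_map]
  simp only [List.nil_append]
  apply List.map_congr_left
  intro s hs
  unfold Pre_calc_autocomplete at hpre
  simp only [List.all_eq_true, List.all_eq_true, decide_eq_true_eq] at hpre
  exact line_eq s (hpre s hs)
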